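-- pv_equiv track=rewrite | github.com/ZioCecio/AoC | 2023/13 - Point of Incidence/solution1.py | get_sol
-- ===== SOURCE A (Python) =====
-- def get_sol(mat):
--     for i in range(len(mat) - 1):
--         if mat[i] == mat[i + 1]:
--             j = 0
--
--             while i - j >= 0 and i + j + 1 < len(mat):
--                 if mat[i - j] != mat[i + j + 1]:
--                     break
--                 j += 1
--
--             if i - j == -1 or (i + j + 1) == len(mat):
--                 return i + 1
--     return 0
-- ===== SOURCE B (Python) =====
-- def get_sol(mat):
--     n = len(mat)
--     for i in range(1, n):
--         k = min(i, n - i)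
--         if mat[i - 1] == mat[i] and mat[i - k:i][::-1] == mat[i:i + k]:
--             return i
--     return 0
-- ===== Notes on version B (the rewrite author's own statement) =====
-- stated objective: alternative
-- what changed: Replaces the hand-rolled two-index expansion loop around each equal adjacent pair with a direct per-candidate check that the reversed prefix slice equals the suffix slice, so the inner while loop and edge-condition bookkeeping disappear.
import Mathlib
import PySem

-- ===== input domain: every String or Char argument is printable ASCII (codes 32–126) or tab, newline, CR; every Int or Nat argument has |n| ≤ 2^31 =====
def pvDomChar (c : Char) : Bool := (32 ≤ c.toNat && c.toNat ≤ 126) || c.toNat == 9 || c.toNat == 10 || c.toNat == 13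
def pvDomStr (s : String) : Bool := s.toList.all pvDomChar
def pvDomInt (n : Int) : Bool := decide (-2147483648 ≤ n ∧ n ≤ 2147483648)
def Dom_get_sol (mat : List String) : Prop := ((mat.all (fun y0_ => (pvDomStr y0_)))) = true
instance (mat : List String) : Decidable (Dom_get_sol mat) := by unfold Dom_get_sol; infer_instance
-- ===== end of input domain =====

-- B replaces the index-expansion while loop with a reversed-prefix/suffix slice comparison; no speed claim.

-- ===== PORT A =====
-- Python 'while i - j >= 0 and i + j + 1 < len(mat)': i, j ≥ 0, so 'i - j >= 0'
-- is 'j ≤ i'; both indices are in range whenever the body reads them, so getD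
-- with default "" reads exactly the Python elements.
def whileA (mat : List String) (i j : Nat) : Nat :=
  if h : j ≤ i ∧ i + j + 1 < mat.length then
    if mat.getD (i - j) "" ≠ mat.getD (i + j + 1) "" then j
    else whileA mat i (j + 1)
  else j
termination_by mat.length - j
decreasing_by omega

def loopA (mat : List String) : List Nat → Int
  | [] => 0
  | i :: rest =>
    if mat.getD i "" = mat.getD (i + 1) "" then
      if (i : Int) - ((whileA mat i 0 : Nat) : Int) = -1 ∨
          (i : Int) + ((whileA mat i 0 : Nat) : Int) + 1 = (mat.length : Int) then
        (i : Int) + 1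
      else loopA mat rest
    else loopA mat rest

def get_sol (mat : List String) : Int := loopA mat (List.range (mat.length - 1))

-- ===== PORT B =====
-- Source B: for i in range(1, n): k = min(i, n - i);
--        if mat[i-1] == mat[i] and mat[i-k:i][::-1] == mat[i:i+k]: return i
-- (Source B's local k = min(i, n - i) is inlined at its two uses; indices i-1, i are
-- in range since 1 ≤ i < n, so getD with default "" reads exactly the Python elements)
def loopB (mat : List String) : List Nat → Int
  | [] => 0
  | i :: rest =>
    if mat.getD (i - 1) "" = mat.getD i "" ∧
        (PySem.List.slice mat (some ((i : Int) - ((min i (mat.length - i) : Nat) : Int))) (some (i : Int))).reverse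
        = PySem.List.slice mat (some (i : Int)) (some ((i : Int) + ((min i (mat.length - i) : Nat) : Int))) then
      (i : Int)
    else loopB mat rest

def get_sol_alt (mat : List String) : Int := loopB mat (List.range' 1 (mat.length - 1))

-- ===== PRECONDITION & SPEC =====
def Spec_get_sol (mat : List String) (out : Int) : Prop := out = get_sol_alt mat
instance (mat : List String) (out : Int) : Decidable (Spec_get_sol mat out) := by unfold Spec_get_sol; infer_instance

-- ===== CLAIM (what is proved, stated in full; the proofs are below) =====
def Claim_equal_get_sol : Prop := ∀ (mat : List String), Dom_get_sol mat → Spec_get_sol mat (get_sol mat)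

-- ===== LEMMAS AND PROOFS =====

-- shared spec: the first k mirror pairs around the gap after row i all match
def MirrEq (mat : List String) (i k : Nat) : Prop :=
  ∀ j, j < k → mat.getD (i - j) "" = mat.getD (i + j + 1) ""

theorem whileA_all (mat : List String) (i : Nat) (hi : i + 1 < mat.length)
    (k : Nat) (hk : k = min (i + 1) (mat.length - i - 1))
    (j : Nat) (hj : j ≤ k)
    (h : ∀ j', j ≤ j' → j' < k → mat.getD (i - j') "" = mat.getD (i + j' + 1) "") :
    whileA mat i j = k := by
  rw [whileA]
  split
  · next hcond =>
    have hjk : j < k := by omega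
    rw [if_neg (not_not_intro (h j le_rfl hjk))]
    exact whileA_all mat i hi k hk (j + 1) (by omega) (fun j' h1 h2 => h j' (by omega) h2)
  · next hcond => omega
termination_by k - j

theorem whileA_stop (mat : List String) (i : Nat) (hi : i + 1 < mat.length)
    (k : Nat) (hk : k = min (i + 1) (mat.length - i - 1))
    (j j0 : Nat) (hj : j ≤ j0) (h0 : j0 < k)
    (hne : mat.getD (i - j0) "" ≠ mat.getD (i + j0 + 1) "")
    (h : ∀ j', j ≤ j' → j' < j0 → mat.getD (i - j') "" = mat.getD (i + j' + 1) "") :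
    whileA mat i j = j0 := by
  rw [whileA]
  split
  · next hcond =>
    by_cases hjj : j = j0
    · subst hjj; rw [if_pos hne]
    · rw [if_neg (not_not_intro (h j le_rfl (by omega)))]
      exact whileA_stop mat i hi k hk (j + 1) j0 (by omega) h0 hne (fun j' h1 h2 => h j' (by omega) h2)
  · next hcond => omega
termination_by j0 - j

-- A's per-candidate acceptance ↔ MirrEq
theorem lemA (mat : List String) (i : Nat) (hi : i + 1 < mat.length) :
    (mat.getD i "" = mat.getD (i + 1) "" ∧
      ((i : Int) - ((whileA mat i 0 : Nat) : Int) = -1 ∨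
       (i : Int) + ((whileA mat i 0 : Nat) : Int) + 1 = (mat.length : Int)))
    ↔ MirrEq mat i (min (i + 1) (mat.length - i - 1)) := by
  constructor
  · rintro ⟨h0, hdisj⟩
    by_cases hP : MirrEq mat i (min (i + 1) (mat.length - i - 1))
    · exact hP
    · exfalso
      unfold MirrEq at hP
      push Not at hP
      have hex : ∃ j, j < min (i + 1) (mat.length - i - 1) ∧
          mat.getD (i - j) "" ≠ mat.getD (i + j + 1) "" := hP
      have hsp1 := (Nat.find_spec hex).1
      have hsp2 := (Nat.find_spec hex).2
      have hw := whileA_stop mat i hi _ rfl 0 (Nat.find hex) (Nat.zero_le _) hsp1 hsp2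
        (fun j' _ hlt => by
          by_contra hne
          exact absurd ⟨(by omega : j' < min (i + 1) (mat.length - i - 1)), hne⟩
            (Nat.find_min hex hlt))
      rw [hw] at hdisj
      omega
  · intro hP
    have hw := whileA_all mat i hi _ rfl 0 (Nat.zero_le _) (fun j' _ hlt => hP j' hlt)
    refine ⟨by simpa using hP 0 (by omega), ?_⟩
    rw [hw]
    omega

theorem getD_eq_getElem' (mat : List String) (x : Nat) (h : x < mat.length) :
    mat.getD x "" = mat[x] := by
  rw [List.getD_eq_getElem?_getD, List.getElem?_eq_getElem h, Option.getD_some]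

theorem take_drop_rev (mat : List String) (i k : Nat) (hi : i + 1 < mat.length)
    (hk1 : k ≤ i + 1) (hk2 : k + i + 1 ≤ mat.length) :
    (((mat.drop (i + 1 - k)).take k).reverse = (mat.drop (i + 1)).take k) ↔ MirrEq mat i k := by
  have hlenL : ((mat.drop (i + 1 - k)).take k).length = k := by simp; omega
  have hlenR : ((mat.drop (i + 1)).take k).length = k := by simp; omega
  constructor
  · intro hEq j hj
    have hb1 : j < ((mat.drop (i + 1 - k)).take k).reverse.length := by
      rw [List.length_reverse, hlenL]; exact hj
    have hb2 : j < ((mat.drop (i + 1)).take k).length := by rw [hlenR]; exact hj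
    have h : ((mat.drop (i + 1 - k)).take k).reverse[j]'hb1
        = ((mat.drop (i + 1)).take k)[j]'hb2 := by simp only [hEq]
    simp only [List.getElem_reverse, List.getElem_take, List.getElem_drop, hlenL] at h
    rw [getD_eq_getElem' mat (i - j) (by omega), getD_eq_getElem' mat (i + j + 1) (by omega)]
    convert h using 2 <;> omega
  · intro hP
    apply List.ext_getElem
    · rw [List.length_reverse, hlenL, hlenR]
    · intro j h1 h2
      simp only [List.getElem_reverse, List.getElem_take, List.getElem_drop, hlenL]
      have hj : j < k := by rw [hlenR] at h2; exact h2
      have h := hP j hj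
      rw [getD_eq_getElem' mat (i - j) (by omega), getD_eq_getElem' mat (i + j + 1) (by omega)] at h
      convert h using 2 <;> omega

-- B's slice comparison alone ↔ MirrEq
theorem lemB_slice (mat : List String) (i : Nat) (hi : i + 1 < mat.length) :
    ((PySem.List.slice mat (some (((i + 1 : Nat) : Int) - ((min (i + 1) (mat.length - (i + 1)) : Nat) : Int))) (some ((i + 1 : Nat) : Int))).reverse
      = PySem.List.slice mat (some ((i + 1 : Nat) : Int)) (some (((i + 1 : Nat) : Int) + ((min (i + 1) (mat.length - (i + 1)) : Nat) : Int))))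
    ↔ MirrEq mat i (min (i + 1) (mat.length - i - 1)) := by
  have hk1 : min (i + 1) (mat.length - (i + 1)) ≤ i + 1 := min_le_left _ _
  have hk2 : min (i + 1) (mat.length - (i + 1)) + i + 1 ≤ mat.length := by omega
  have hkk : min (i + 1) (mat.length - (i + 1)) = min (i + 1) (mat.length - i - 1) := by omega
  have e1 : ((i + 1 : Nat) : Int) - ((min (i + 1) (mat.length - (i + 1)) : Nat) : Int)
      = (((i + 1 - min (i + 1) (mat.length - (i + 1))) : Nat) : Int) := by omega
  have e2 : ((i + 1 : Nat) : Int) + ((min (i + 1) (mat.length - (i + 1)) : Nat) : Int)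
      = (((i + 1 + min (i + 1) (mat.length - (i + 1))) : Nat) : Int) := by push_cast; ring
  rw [e1, e2, PySem.List.slice_natCast, PySem.List.slice_natCast,
    (by omega : i + 1 - (i + 1 - min (i + 1) (mat.length - (i + 1))) = min (i + 1) (mat.length - (i + 1))),
    (by omega : i + 1 + min (i + 1) (mat.length - (i + 1)) - (i + 1) = min (i + 1) (mat.length - (i + 1)))]
  rw [← hkk]
  exact take_drop_rev mat i _ hi hk1 hk2

-- B's per-candidate acceptance (guard plus slice comparison, at split i+1) ↔ MirrEq
theorem lemB (mat : List String) (i : Nat) (hi : i + 1 < mat.length) :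
    (mat.getD (i + 1 - 1) "" = mat.getD (i + 1) "" ∧
      (PySem.List.slice mat (some (((i + 1 : Nat) : Int) - ((min (i + 1) (mat.length - (i + 1)) : Nat) : Int))) (some ((i + 1 : Nat) : Int))).reverse
      = PySem.List.slice mat (some ((i + 1 : Nat) : Int)) (some (((i + 1 : Nat) : Int) + ((min (i + 1) (mat.length - (i + 1)) : Nat) : Int))))
    ↔ MirrEq mat i (min (i + 1) (mat.length - i - 1)) := by
  constructor
  · rintro ⟨_, hs⟩
    exact (lemB_slice mat i hi).mp hs
  · intro hP
    exact ⟨by simpa using hP 0 (by omega), (lemB_slice mat i hi).mpr hP⟩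

theorem loop_eq (mat : List String) (m a : Nat) (hm : a + m ≤ mat.length - 1)
    (hn : 1 ≤ mat.length) :
    loopA mat (List.range' a m) = loopB mat (List.range' (a + 1) m) := by
  induction m generalizing a with
  | zero => rfl
  | succ m ih =>
    rw [List.range'_succ, List.range'_succ]
    simp only [loopA, loopB]
    have hi : a + 1 < mat.length := by omega
    have hA := lemA mat a hi
    have hB := lemB mat a hi
    by_cases hP : MirrEq mat a (min (a + 1) (mat.length - a - 1))
    · obtain ⟨h0, hdisj⟩ := hA.mpr hP
      rw [if_pos h0, if_pos hdisj, if_pos (hB.mpr hP)]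
      push_cast
      ring
    · rw [if_neg (fun hb => hP (hB.mp hb))]
      by_cases h0 : mat.getD a "" = mat.getD (a + 1) ""
      · rw [if_pos h0, if_neg (fun hdisj => hP (hA.mp ⟨h0, hdisj⟩))]
        exact ih (a + 1) (by omega)
      · rw [if_neg h0]
        exact ih (a + 1) (by omega)

-- ===== VERDICT (by name: the statement is the Claim_ definition above) =====
theorem get_sol_spec : Claim_equal_get_sol := by
  intro mat _
  unfold Spec_get_sol get_sol get_sol_alt
  rcases Nat.eq_zero_or_pos mat.length with h | h
  · simp [h, loopA, loopB]
  · rw [List.range_eq_range']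
    exact loop_eq mat (mat.length - 1) 0 (by omega) h
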